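-- pv_equiv track=rewrite | github.com/Lucas-Sperotto/goell-1969-rectangular-waveguide | scripts/field_map.py | make_title
-- ===== SOURCE A (Python) =====
-- def make_title(solver_args: list) -> str:
--     keys = {"--parity": "par", "--phase": "φ", "--field-B": "B",
--             "--field-P": "P'", "--nr": "nᵣ", "--a_over_b": "a/b", "--N": "N"}
--     parts = []
--     for flag, label in keys.items():
--         for i, arg in enumerate(solver_args):
--             if arg == flag and i + 1 < len(solver_args):
--                 parts.append(f"{label}={solver_args[i+1]}")
--                 break
--     return "  ".join(parts)
-- ===== SOURCE B (Python) =====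
-- def make_title(solver_args: list) -> str:
--     keys = {"--parity": "par", "--phase": "φ", "--field-B": "B",
--             "--field-P": "P'", "--nr": "nᵣ", "--a_over_b": "a/b", "--N": "N"}
--     found = {}
--     for i, arg in enumerate(solver_args):
--         if arg in keys and i + 1 < len(solver_args) and arg not in found:
--             found[arg] = solver_args[i + 1]
--     return "  ".join(f"{label}={found[flag]}"
--                      for flag, label in keys.items() if flag in found)
-- ===== Notes on version B (the rewrite author's own statement) =====
-- stated objective: faster
-- what changed: Replaces A's per-flag repeated scans of solver_args (one full scan per key) with a single pass over solver_args that records the first valued occurrence of each recognised flag in a dict, then one pass over the fixed keys to emit the labelled parts; measured ~2.4x faster (one list traversal instead of seven).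
import Mathlib
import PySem

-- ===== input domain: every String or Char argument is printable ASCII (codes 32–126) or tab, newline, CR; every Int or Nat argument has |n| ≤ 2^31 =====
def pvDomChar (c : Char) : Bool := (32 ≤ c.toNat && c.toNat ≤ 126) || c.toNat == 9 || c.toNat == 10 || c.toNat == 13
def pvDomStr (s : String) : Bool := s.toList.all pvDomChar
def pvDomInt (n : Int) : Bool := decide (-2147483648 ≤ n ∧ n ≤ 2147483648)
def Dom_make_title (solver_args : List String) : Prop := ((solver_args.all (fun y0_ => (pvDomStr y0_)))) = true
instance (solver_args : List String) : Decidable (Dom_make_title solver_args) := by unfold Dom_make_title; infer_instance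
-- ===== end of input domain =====

-- B replaces A's per-flag repeated scans of solver_args with one pass building a
-- first-occurrence dict, then one pass over the fixed keys (measured faster in a timing run).

-- the fixed keys dict, shared literal of both programs (insertion order)
def mtKeys : List (String × String) :=
  [("--parity", "par"), ("--phase", "φ"), ("--field-B", "B"),
   ("--field-P", "P'"), ("--nr", "nᵣ"), ("--a_over_b", "a/b"), ("--N", "N")]

-- ===== PORT A =====
-- inner 'for i, arg in enumerate(solver_args): … break' loop of A
def mtScan (flag : String) (args : List String) : List (Int × String) → Option String
  | [] => none
  | (i, a) :: rest =>
      if a = flag ∧ i + 1 < (args.length : Int) then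
        PySem.List.pyGet? args (i + 1)        -- solver_args[i+1]; the guard puts it in range
      else mtScan flag args rest

def make_title (solver_args : List String) : String :=
  PySem.Str.join "  "
    (mtKeys.foldl (fun parts q =>
      match mtScan q.1 solver_args (PySem.List.enumerate solver_args) with
      | some v => parts ++ [q.2 ++ "=" ++ v]
      | none => parts) [])

-- ===== PORT B =====
def mtInKeys (x : String) : Bool := mtKeys.any (fun q => q.1 == x)   -- 'arg in keys'

-- body of B's single loop over enumerate(solver_args)
def mtStep (args : List String) (d : PySem.Dict String String) (p : Int × String) :
    PySem.Dict String String :=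
  if mtInKeys p.2 && decide (p.1 + 1 < (args.length : Int)) && (d.get? p.2).isNone then
    d.insert p.2 ((PySem.List.pyGet? args (p.1 + 1)).getD "")   -- index guarded in range, exact
  else d

def make_title_alt (solver_args : List String) : String :=
  let found := (PySem.List.enumerate solver_args).foldl (mtStep solver_args) PySem.Dict.empty
  PySem.Str.join "  "
    (mtKeys.filterMap (fun q => (found.get? q.1).map (fun v => q.2 ++ "=" ++ v)))

-- ===== PRECONDITION & SPEC =====
def Spec_make_title (solver_args : List String) (out : String) : Prop := out = make_title_alt solver_args
instance (solver_args : List String) (out : String) : Decidable (Spec_make_title solver_args out) := by unfold Spec_make_title; infer_instance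

-- ===== CLAIM (what is proved, stated in full; the proofs are below) =====
def Claim_equal_make_title : Prop := ∀ (solver_args : List String), Dom_make_title solver_args → Spec_make_title solver_args (make_title solver_args)

-- ===== LEMMAS AND PROOFS =====

-- B's dict fold, read through get?, computes exactly A's first-hit scan
theorem mtFold_get (args : List String) (x : String) (hx : mtInKeys x = true) :
    ∀ (l : List (Int × String)) (d : PySem.Dict String String),
      (∀ p ∈ l, ∃ (k : Nat) (h : k < args.length), p = ((k : Int), args[k])) →
      (l.foldl (mtStep args) d).get? x = (d.get? x).or (mtScan x args l) := by
  intro l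
  induction l with
  | nil => intro d _; simp [mtScan]
  | cons p rest ih =>
    intro d hmem
    obtain ⟨k, hk, hp⟩ := hmem p (by simp)
    subst hp
    have hrest : ∀ q ∈ rest, ∃ (k : Nat) (h : k < args.length), q = ((k : Int), args[k]) :=
      fun q hq => hmem q (by simp [hq])
    simp only [List.foldl_cons, mtStep, mtScan]
    by_cases hax : args[k] = x
    · by_cases hlt : (k : Int) + 1 < (args.length : Int)
      · have hklen : k + 1 < args.length := by exact_mod_cast hlt
        have hget : PySem.List.pyGet? args ((k : Int) + 1) = some args[k + 1] := by
          have : ((k : Int) + 1) = ((k + 1 : Nat) : Int) := by push_cast; ring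
          rw [this, PySem.List.pyGet?_natCast, List.getElem?_eq_getElem hklen]
        by_cases hd : (d.get? x).isNone
        · have hd' : d.get? x = none := Option.isNone_iff_eq_none.mp hd
          simp only [hax, hlt, hd, hx, and_true, if_pos, decide_true, Bool.and_self]
          rw [ih _ hrest]
          rw [PySem.Dict.get?_insert_self]
          simp [hd', hget]
        · have hd' : ∃ v, d.get? x = some v := by
            cases h : d.get? x with
            | none => simp [h] at hd
            | some v => exact ⟨v, rfl⟩
          obtain ⟨v, hv⟩ := hd'
          simp only [hax, hd, Bool.and_false, if_neg, Bool.false_eq_true, not_false_iff]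
          rw [ih _ hrest, hv]
          simp
      · simp only [hax, hlt, decide_false, Bool.and_false, Bool.false_and,
          Bool.false_eq_true, not_false_iff, if_neg]
        rw [ih _ hrest]
        simp
    · -- arg ≠ flag: the scan skips; an insert (if any) is under a different key
      have hcond : ¬ (args[k] = x ∧ (k : Int) + 1 < (args.length : Int)) := by
        intro h; exact hax h.1
      rw [if_neg hcond]
      by_cases hc : (mtInKeys args[k] && decide ((k : Int) + 1 < (args.length : Int)) && (d.get? args[k]).isNone) = true
      · rw [if_pos hc, ih _ hrest]
        have hne : x ≠ args[k] := fun h => hax h.symm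
        simp [PySem.Dict.get?_insert_of_ne _ _ hne]
      · rw [if_neg hc, ih _ hrest]

-- A's parts-accumulating fold over the keys is a filterMap
theorem mtFoldl_parts (F : String → Option String) :
    ∀ (ks : List (String × String)) (acc : List String),
      ks.foldl (fun parts q =>
        match F q.1 with
        | some v => parts ++ [q.2 ++ "=" ++ v]
        | none => parts) acc
      = acc ++ ks.filterMap (fun q => (F q.1).map (fun v => q.2 ++ "=" ++ v)) := by
  intro ks
  induction ks with
  | nil => intro acc; simp
  | cons q rest ih =>
    intro acc
    simp only [List.foldl_cons, List.filterMap_cons]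
    cases h : F q.1 with
    | none => simp [ih]
    | some v => simp [ih]

theorem mtMem_inKeys (q : String × String) (hq : q ∈ mtKeys) : mtInKeys q.1 = true := by
  unfold mtInKeys
  exact List.any_eq_true.mpr ⟨q, hq, by simp⟩

-- ===== VERDICT (by name: the statement is the Claim_ definition above) =====
theorem make_title_spec : Claim_equal_make_title := by
  intro args _
  unfold Spec_make_title make_title make_title_alt
  rw [mtFoldl_parts (fun x => mtScan x args (PySem.List.enumerate args))]
  simp only [List.nil_append]
  congr 1
  apply List.filterMap_congr
  intro q hq
  have hget := mtFold_get args q.1 (mtMem_inKeys q hq) (PySem.List.enumerate args)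
    PySem.Dict.empty ?_
  · rw [hget]; simp
  · intro p hp
    rcases (PySem.List.mem_enumerate_iff _ _ _).mp hp with ⟨k, hk, hpk⟩
    exact ⟨k, hk, by simpa using hpk⟩
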